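-- pv_equiv track=rewrite | github.com/zhangji520-github/Multidal_RAG_Engineering | utils/common_utils.py | get_surrounding_text_content
-- ===== SOURCE A (Python) =====
-- def get_surrounding_text_content(data_list, index):
--     """
--     获取指定图片字典的前后文本字典的文本内容。
--
--     参数:
--         data_list: 包含字典的列表，每个字典有'text'和'image_path'键
--         index: 当前图片字典在列表中的索引
--
--     返回:
--         一个元组 (prev_text, next_text):
--         - prev_text: 前一个文本字典的文本内容，如果找不到则为 None
--         - next_text: 后一个文本字典的文本内容，如果找不到则为 None
--     """
--     prev_text = None
--     next_text = None
--
--     # 查找前一个文本字典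
--     i = index - 1
--     while i >= 0:
--         if 'text' in data_list[i] and data_list[i].get('image_path') is None: # 检查是否为文本字典
--             prev_text = data_list[i].get('text')
--             break
--         i -= 1
--
--     # 查找后一个文本字典
--     j = index + 1
--     while j < len(data_list):
--         if 'text' in data_list[j] and data_list[j].get('image_path') is None: # 检查是否为文本字典
--             next_text = data_list[j].get('text')
--             break
--         j += 1
--
--     return prev_text, next_text
-- ===== SOURCE B (Python) =====
-- def get_surrounding_text_content(data_list, index):
--     """Single forward sweep: keep overwriting prev_text before index (last one
--     wins = nearest preceding), take the first qualifying dict after index."""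
--     prev_text = None
--     next_text = None
--     next_found = False
--     for p, d in enumerate(data_list):
--         if 'text' in d and d.get('image_path') is None:
--             if p < index:
--                 prev_text = d.get('text')
--             elif p > index and not next_found:
--                 next_text = d.get('text')
--                 next_found = True
--     return prev_text, next_text
-- ===== Notes on version B (the rewrite author's own statement) =====
-- stated objective: alternative
-- what changed: Replaces the two directional break-out while-loops (scan down from index-1, scan up from index+1) by one forward pass with enumerate that maintains both accumulators (last qualifying text before index, first qualifying text after it).
-- outside the precondition, e.g. on get_surrounding_text_content([{'text': 'a'}, {'text': 'b'}], -2): A returns (None, 'b'), B returns (None, 'a')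
import Mathlib
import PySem

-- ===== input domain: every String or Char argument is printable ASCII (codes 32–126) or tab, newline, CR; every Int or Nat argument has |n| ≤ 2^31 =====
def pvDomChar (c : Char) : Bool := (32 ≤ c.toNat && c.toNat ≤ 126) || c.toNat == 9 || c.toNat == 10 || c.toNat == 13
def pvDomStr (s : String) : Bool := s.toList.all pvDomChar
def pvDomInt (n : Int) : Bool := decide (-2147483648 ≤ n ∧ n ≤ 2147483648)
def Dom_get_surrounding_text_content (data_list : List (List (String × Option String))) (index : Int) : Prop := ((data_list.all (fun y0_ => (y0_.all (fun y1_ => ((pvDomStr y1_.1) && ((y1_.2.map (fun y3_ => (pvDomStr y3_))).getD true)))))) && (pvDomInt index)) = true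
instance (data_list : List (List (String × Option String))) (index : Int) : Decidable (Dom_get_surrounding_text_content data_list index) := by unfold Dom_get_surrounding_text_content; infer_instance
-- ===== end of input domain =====

-- B replaces A's two directional break-out scans by one forward pass maintaining both accumulators (objective: alternative decomposition, same cost).

-- dict lookup, association list with first-match semantics: d.get(k) (None when absent or stored None)
def pvGetVal (d : List (String × Option String)) (k : String) : Option String :=
  match d.find? (fun kv => kv.1 == k) with
  | some kv => kv.2
  | none => none

-- 'text' in d and d.get('image_path') is None
def pvIsText (d : List (String × Option String)) : Bool :=
  (d.find? (fun kv => kv.1 == "text")).isSome && (pvGetVal d "image_path" == none)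

-- ===== PORT A =====
-- while i >= 0: … break / i -= 1
def pvFindPrevA (dl : List (List (String × Option String))) (i : Int) : Option String :=
  if h : 0 ≤ i then
    match PySem.List.pyGet? dl i with
    | some d => if pvIsText d then pvGetVal d "text" else pvFindPrevA dl (i - 1)
    | none => none      -- IndexError in Python; outside Pre_
  else none
termination_by (i + 1).toNat
decreasing_by omega

-- while j < len(data_list): … break / j += 1
def pvFindNextA (dl : List (List (String × Option String))) (j : Int) : Option String :=
  if h : j < (dl.length : Int) then
    match PySem.List.pyGet? dl j with
    | some d => if pvIsText d then pvGetVal d "text" else pvFindNextA dl (j + 1)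
    | none => none      -- IndexError in Python; outside Pre_
  else none
termination_by ((dl.length : Int) - j).toNat
decreasing_by omega

def get_surrounding_text_content (data_list : List (List (String × Option String))) (index : Int) : Option String × Option String :=
  (pvFindPrevA data_list (index - 1), pvFindNextA data_list (index + 1))

-- ===== PORT B =====
-- loop body of B's single forward pass; acc = (prev_text, next_text, next_found)
def pvStepB (index : Int) (acc : Option String × Option String × Bool)
    (pd : Int × List (String × Option String)) : Option String × Option String × Bool :=
  if pvIsText pd.2 then
    if pd.1 < index then (pvGetVal pd.2 "text", acc.2.1, acc.2.2)
    else if pd.1 > index && !acc.2.2 then (acc.1, pvGetVal pd.2 "text", true)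
    else acc
  else acc

def get_surrounding_text_content_alt (data_list : List (List (String × Option String))) (index : Int) : Option String × Option String :=
  let r := (PySem.List.enumerate data_list 0).foldl (pvStepB index) (none, none, false)
  (r.1, r.2.1)

-- ===== PRECONDITION & SPEC =====
-- Pre_ excludes the inputs where A raises IndexError (index > len, or index < -len-1) and,
-- for the remaining negative index values, the accidental case in which A's next-scan starts
-- at a Python negative index, wraps into the tail of the list and hits a text dict there while
-- an earlier text dict exists — there A's answer is an artefact of negative-index wraparound.
def Pre_get_surrounding_text_content (data_list : List (List (String × Option String))) (index : Int) : Prop :=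
  -((data_list.length : Int) + 1) ≤ index ∧ index ≤ (data_list.length : Int) ∧
    (index < -1 →
      ¬(((data_list.drop ((data_list.length : Int) + index + 1).toNat).any pvIsText) = true ∧
        ((data_list.take ((data_list.length : Int) + index + 1).toNat).any pvIsText) = true))
instance (data_list : List (List (String × Option String))) (index : Int) : Decidable (Pre_get_surrounding_text_content data_list index) := by unfold Pre_get_surrounding_text_content; infer_instance

def pvWitness_get_surrounding_text_content : (List (List (String × Option String))) × Int :=
  ([[("text", some "a")], [("text", none), ("image_path", some "p")], [("text", some "c")]], 1)

def Spec_get_surrounding_text_content (data_list : List (List (String × Option String))) (index : Int) (out : Option String × Option String) : Prop := out = get_surrounding_text_content_alt data_list index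
instance (data_list : List (List (String × Option String))) (index : Int) (out : Option String × Option String) : Decidable (Spec_get_surrounding_text_content data_list index out) := by unfold Spec_get_surrounding_text_content; infer_instance

-- ===== CLAIM (what is proved, stated in full; the proofs are below) =====
def Claim_equal_get_surrounding_text_content : Prop := ∀ (data_list : List (List (String × Option String))) (index : Int), Dom_get_surrounding_text_content data_list index → Pre_get_surrounding_text_content data_list index → Spec_get_surrounding_text_content data_list index (get_surrounding_text_content data_list index)

-- ===== LEMMAS AND PROOFS =====

-- A's downward scan from n-1 finds the first qualifying dict of the reversed n-prefix
theorem pvFindPrevA_char (dl : List (List (String × Option String))) :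
    ∀ n : Nat, n ≤ dl.length →
      pvFindPrevA dl ((n : Int) - 1) =
        ((dl.take n).reverse.find? pvIsText).bind (fun d => pvGetVal d "text") := by
  intro n
  induction n with
  | zero => intro _; simp [pvFindPrevA]
  | succ m ih =>
    intro h
    have hm : m < dl.length := by omega
    rw [show ((m + 1 : Nat) : Int) - 1 = (m : Int) by push_cast; ring]
    rw [pvFindPrevA]
    simp only [Int.ofNat_nonneg, dite_true]
    rw [PySem.List.pyGet?_natCast]
    have hget : dl[m]? = some dl[m] := List.getElem?_eq_getElem hm
    rw [hget]
    have htake : dl.take (m + 1) = dl.take m ++ [dl[m]] := by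
      rw [List.take_succ, hget]; rfl
    rw [htake, List.reverse_append]
    simp only [List.reverse_singleton, List.singleton_append, List.find?_cons]
    by_cases hq : pvIsText dl[m]
    · simp [hq]
    · simp only [hq, if_neg, Bool.false_eq_true]
      rw [show (m : Int) - 1 = ((m : Nat) : Int) - 1 by norm_num]
      exact ih (by omega)

-- A's upward scan from j finds the first qualifying dict of the j-suffix
theorem pvFindNextA_char (dl : List (List (String × Option String))) :
    ∀ j : Nat, pvFindNextA dl (j : Int) =
      ((dl.drop j).find? pvIsText).bind (fun d => pvGetVal d "text") := by
  intro j
  by_cases hj : j < dl.length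
  · induction hfuel : dl.length - j generalizing j with
    | zero => omega
    | succ m ih =>
      rw [pvFindNextA]
      have hj' : (j : Int) < (dl.length : Int) := by exact_mod_cast hj
      simp only [hj', dite_true]
      rw [PySem.List.pyGet?_natCast]
      have hget : dl[j]? = some dl[j] := List.getElem?_eq_getElem hj
      rw [hget]
      have hdrop : dl.drop j = dl[j] :: dl.drop (j + 1) := List.drop_eq_getElem_cons hj
      rw [hdrop, List.find?_cons]
      by_cases hq : pvIsText dl[j]
      · simp [hq]
      · simp only [hq, Bool.false_eq_true, if_neg]
        rw [show (j : Int) + 1 = ((j + 1 : Nat) : Int) by push_cast; ring]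
        by_cases hj2 : j + 1 < dl.length
        · exact ih (j + 1) hj2 (by omega)
        · rw [pvFindNextA, dif_neg (by push_cast; omega)]
          simp [List.drop_eq_nil_of_le (by omega : dl.length ≤ j + 1)]
  · rw [pvFindNextA]
    have : ¬ (j : Int) < (dl.length : Int) := by exact_mod_cast hj
    simp [this, List.drop_eq_nil_of_le (by omega : dl.length ≤ j)]

-- B's fold over a segment whose positions are all below index only updates prev_text
theorem pvFold_lt (index : Int) (xs : List (List (String × Option String))) :
    ∀ (k : Int) (a b : Option String) (f : Bool), k + xs.length ≤ index →
      (PySem.List.enumerate xs k).foldl (pvStepB index) (a, b, f) =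
        ((match xs.reverse.find? pvIsText with
          | some d => pvGetVal d "text"
          | none => a), b, f) := by
  induction xs with
  | nil => intro k a b f _; simp [PySem.List.enumerate_nil]
  | cons x xs ih =>
    intro k a b f h
    have hk : k < index := by simp at h; omega
    rw [PySem.List.enumerate_cons, List.foldl_cons]
    have hstep : pvStepB index (a, b, f) (k, x) =
        ((if pvIsText x then pvGetVal x "text" else a), b, f) := by
      unfold pvStepB
      by_cases hq : pvIsText x <;> simp [hq, hk]
    rw [hstep]
    rw [ih (k + 1) _ b f (by simp at h ⊢; omega)]
    simp only [List.reverse_cons, List.find?_append]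
    by_cases hq : pvIsText x
    · cases hfind : xs.reverse.find? pvIsText <;> simp [hfind, hq]
    · cases hfind : xs.reverse.find? pvIsText <;> simp [hfind, hq]

-- B's fold over a segment whose positions are all above index only updates next_text,
-- and only while the found flag is still false
theorem pvFold_gt (index : Int) (xs : List (List (String × Option String))) :
    ∀ (k : Int) (a b : Option String) (f : Bool), index < k →
      (PySem.List.enumerate xs k).foldl (pvStepB index) (a, b, f) =
        (a, (if f then b else
          match xs.find? pvIsText with
          | some d => pvGetVal d "text"
          | none => b), f || (xs.find? pvIsText).isSome) := by
  induction xs with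
  | nil => intro k a b f _; simp [PySem.List.enumerate_nil]
  | cons x xs ih =>
    intro k a b f h
    rw [PySem.List.enumerate_cons, List.foldl_cons]
    have hk1 : ¬ (k < index) := by omega
    have hk2 : k > index := h
    by_cases hq : pvIsText x
    · by_cases hf : f
      · have hstep : pvStepB index (a, b, f) (k, x) = (a, b, f) := by
          unfold pvStepB; simp [hq, hk1, hk2, hf]
        rw [hstep, ih (k + 1) a b f (by omega)]
        simp [List.find?_cons, hq, hf]
      · have hstep : pvStepB index (a, b, f) (k, x) = (a, pvGetVal x "text", true) := by
          unfold pvStepB; simp [hq, hk1, hk2, hf]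
        rw [hstep, ih (k + 1) a (pvGetVal x "text") true (by omega)]
        simp [List.find?_cons, hq, hf]
    · have hstep : pvStepB index (a, b, f) (k, x) = (a, b, f) := by
        unfold pvStepB; simp [hq]
      rw [hstep, ih (k + 1) a b f (by omega)]
      simp [List.find?_cons, hq]

-- enumerate splits over append
theorem pvEnumerate_append (xs ys : List (List (String × Option String))) :
    ∀ k : Int, PySem.List.enumerate (xs ++ ys) k =
      PySem.List.enumerate xs k ++ PySem.List.enumerate ys (k + xs.length) := by
  induction xs with
  | nil => intro k; simp [PySem.List.enumerate_nil]
  | cons x xs ih =>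
    intro k
    have harg : k + 1 + (xs.length : Int) = k + (((x :: xs).length : Nat) : Int) := by
      push_cast [List.length_cons]; omega
    rw [List.cons_append, PySem.List.enumerate_cons, PySem.List.enumerate_cons,
      ih (k + 1), harg]
    simp

-- A's upward scan from a Python negative index -k wraps: it first scans the tail
-- dl[len-k:], then (having reached index 0) the whole list
theorem pvFindNextA_neg (dl : List (List (String × Option String))) :
    ∀ k : Nat, k ≤ dl.length →
      pvFindNextA dl (-(k : Int)) =
        (((dl.drop (dl.length - k)).find? pvIsText).or (dl.find? pvIsText)).bind
          (fun d => pvGetVal d "text") := by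
  intro k
  induction k with
  | zero =>
    intro _
    rw [show (-((0 : Nat) : Int)) = (((0 : Nat)) : Int) by norm_num, pvFindNextA_char dl 0]
    simp
  | succ m ih =>
    intro h
    have hlen : 0 < dl.length := by omega
    rw [pvFindNextA, dif_pos (by push_cast; omega),
      PySem.List.pyGet?_neg_natCast dl (m + 1) (by omega) h]
    have hget : dl[dl.length - (m + 1)]? = some dl[dl.length - (m + 1)] :=
      List.getElem?_eq_getElem (by omega)
    rw [hget]
    have hdrop : dl.drop (dl.length - (m + 1)) =
        dl[dl.length - (m + 1)] :: dl.drop (dl.length - m) := by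
      rw [List.drop_eq_getElem_cons (by omega : dl.length - (m + 1) < dl.length),
        show dl.length - (m + 1) + 1 = dl.length - m from by omega]
    rw [hdrop, List.find?_cons]
    by_cases hq : pvIsText dl[dl.length - (m + 1)]
    · simp [hq]
    · simp only [hq, Bool.false_eq_true, if_neg]
      rw [show -(((m + 1 : Nat)) : Int) + 1 = -((m : Nat) : Int) by push_cast; ring]
      exact ih (by omega)

-- ===== VERDICT (by name: the statement is the Claim_ definition above) =====
theorem get_surrounding_text_content_spec : Claim_equal_get_surrounding_text_content := by
  intro dl index _ hpre
  obtain ⟨hlow, hlen, hwrap⟩ := hpre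
  unfold Spec_get_surrounding_text_content
  unfold get_surrounding_text_content get_surrounding_text_content_alt
  by_cases h0 : 0 ≤ index
  swap
  · -- index < 0: A's prev-scan never runs; its next-scan agrees with B under Pre_
    have hprev : pvFindPrevA dl (index - 1) = none := by
      rw [pvFindPrevA, dif_neg (by omega)]
    rw [hprev, pvFold_gt index dl 0 none none false (by omega)]
    have hnext : pvFindNextA dl (index + 1) =
        (dl.find? pvIsText).bind (fun d => pvGetVal d "text") := by
      by_cases hm1 : index = -1
      · subst hm1
        rw [show (-1 : Int) + 1 = (((0 : Nat)) : Int) by norm_num, pvFindNextA_char dl 0]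
        simp
      · -- index < -1: wraparound scan; Pre_ rules out the accidental case
        have hwrap' := hwrap (by omega)
        set k : Nat := (-(index + 1)).toNat with hk
        have hk2 : k ≤ dl.length := by omega
        have hm : dl.length - k = ((dl.length : Int) + index + 1).toNat := by omega
        rw [show index + 1 = -((k : Nat) : Int) by omega, pvFindNextA_neg dl k hk2]
        cases hd : (dl.drop (dl.length - k)).find? pvIsText with
        | none =>
          cases hdl : dl.find? pvIsText <;> simp [hdl]
        | some d =>
          have hanyd : (dl.drop (dl.length - k)).any pvIsText = true := by
            rw [List.any_eq_true]
            have := List.find?_isSome.mp (by rw [hd]; rfl)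
            exact this
          have htake : (dl.take (dl.length - k)).find? pvIsText = none := by
            cases ht : (dl.take (dl.length - k)).find? pvIsText with
            | none => rfl
            | some d' =>
              exfalso
              apply hwrap'
              refine ⟨by rw [← hm]; exact hanyd, ?_⟩
              rw [← hm, List.any_eq_true]
              exact List.find?_isSome.mp (by rw [ht]; rfl)
          have hdl : dl.find? pvIsText = some d := by
            conv_lhs => rw [← List.take_append_drop (dl.length - k) dl]
            rw [List.find?_append, htake, hd]
            rfl
          simp [hdl]
    rw [hnext]
    cases hdl : dl.find? pvIsText <;> simp [hdl]
  obtain ⟨n, rfl⟩ : ∃ n : Nat, index = (n : Int) := ⟨index.toNat, (Int.toNat_of_nonneg h0).symm⟩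
  have hnlen : n ≤ dl.length := by exact_mod_cast hlen
  by_cases hcase : n < dl.length
  · -- split the list at position n = index
    have hsplit : dl = dl.take n ++ dl[n] :: dl.drop (n + 1) := by
      conv_lhs => rw [← List.take_append_drop n dl]
      rw [List.drop_eq_getElem_cons hcase]
    have hl : ((dl.take n).length : Int) = (n : Int) := by
      simp [List.length_take]; omega
    conv_rhs => rw [hsplit]
    rw [pvEnumerate_append, List.foldl_append,
      pvFold_lt (n : Int) _ 0 none none false (by simp [List.length_take]),
      PySem.List.enumerate_cons, List.foldl_cons]
    have hmid : ∀ acc2 : Option String × Bool,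
        pvStepB (n : Int) ((match (dl.take n).reverse.find? pvIsText with
          | some d => pvGetVal d "text" | none => none), acc2)
          ((0 : Int) + (dl.take n).length, dl[n]) =
        ((match (dl.take n).reverse.find? pvIsText with
          | some d => pvGetVal d "text" | none => none), acc2) := by
      intro acc2
      unfold pvStepB
      simp only [zero_add, hl]
      by_cases hq : pvIsText dl[n] <;> simp [hq]
    rw [hmid, pvFold_gt (n : Int) _ _ _ _ _ (by rw [zero_add, hl]; omega),
      pvFindPrevA_char dl n hnlen,
      show (n : Int) + 1 = ((n + 1 : Nat) : Int) by push_cast; ring,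
      pvFindNextA_char dl (n + 1)]
    cases hf1 : (dl.take n).reverse.find? pvIsText <;>
      cases hf2 : (dl.drop (n + 1)).find? pvIsText <;> simp [hf1, hf2]
  · -- n = dl.length: no element at or after index
    have hne : n = dl.length := by omega
    rw [pvFold_lt (n : Int) dl 0 none none false (by omega),
      pvFindPrevA_char dl n hnlen,
      show (n : Int) + 1 = ((n + 1 : Nat) : Int) by push_cast; ring,
      pvFindNextA_char dl (n + 1),
      List.drop_eq_nil_of_le (by omega : dl.length ≤ n + 1),
      show dl.take n = dl by rw [hne, List.take_length]]
    cases hf1 : dl.reverse.find? pvIsText <;> simp [hf1]
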